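-- pv_equiv track=rewrite | github.com/scopeInfinity/QLifeProcessor | assembler/util.py | is_valid_label
-- ===== SOURCE A (Python) =====
-- import string
--
-- def is_valid_label(msg):
--     if len(msg) == 0:
--         return False
--     if msg[0] in string.digits:
--         return False
--     if msg in [f"R{i}" for i in range(10)]:
--         return False
--     if msg in ["section", "data", "bss"]:
--         return False
--     return set(msg) <= set(string.ascii_uppercase + string.ascii_lowercase + string.digits + "_")
-- ===== SOURCE B (Python) =====
-- # One left-to-right pass: a character-class check and a parallel prefix-filter of the
-- # reserved-word set run together over the string; no set building, no staged membership guards.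
--
-- _RESERVED = ["section", "data", "bss"] + ["R" + d for d in "0123456789"]
--
--
-- def is_valid_label(msg):
--     cands = _RESERVED
--     for i, c in enumerate(msg):
--         if not ("A" <= c <= "Z" or "a" <= c <= "z" or c == "_" or (i > 0 and "0" <= c <= "9")):
--             return False
--         cands = [w[1:] for w in cands if w[:1] == c]
--     return bool(msg) and "" not in cands
-- ===== Notes on version B (the rewrite author's own statement) =====
-- stated objective: alternative
-- what changed: A runs four staged guards (length, leading-digit membership, two reserved-word list memberships) and finally builds set(msg) and tests subset inclusion against a 63-char alphabet set; B makes one left-to-right pass that simultaneously checks each character's class (position-aware) and narrows a candidate list of reserved words by prefix-filtering, rejecting at the end iff a reserved word was fully consumed.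
import Mathlib
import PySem

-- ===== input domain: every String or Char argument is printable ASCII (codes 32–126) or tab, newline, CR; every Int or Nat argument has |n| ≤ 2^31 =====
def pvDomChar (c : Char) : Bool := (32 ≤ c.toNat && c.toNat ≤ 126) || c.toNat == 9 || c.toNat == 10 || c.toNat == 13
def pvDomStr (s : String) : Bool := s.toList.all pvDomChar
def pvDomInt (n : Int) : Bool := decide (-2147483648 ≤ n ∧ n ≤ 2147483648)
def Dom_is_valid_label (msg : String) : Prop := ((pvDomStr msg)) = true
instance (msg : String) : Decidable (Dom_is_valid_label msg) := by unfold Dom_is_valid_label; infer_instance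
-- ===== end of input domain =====

-- B replaces A's staged guards plus build-a-set-and-test-subset charset check by ONE pass that
-- checks each character's class and prefix-filters the reserved-word candidate list together.

-- ===== PORT A =====
-- string.digits
def pvDigitChars : List Char := ['0','1','2','3','4','5','6','7','8','9']
-- string.ascii_uppercase + string.ascii_lowercase + string.digits + "_"
def pvCharsetA : List Char :=
  ['A','B','C','D','E','F','G','H','I','J','K','L','M','N','O','P','Q','R','S','T','U','V','W','X','Y','Z',
   'a','b','c','d','e','f','g','h','i','j','k','l','m','n','o','p','q','r','s','t','u','v','w','x','y','z',
   '0','1','2','3','4','5','6','7','8','9','_']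
-- [f"R{i}" for i in range(10)]
def pvRList : List String := (PySem.List.pyRange 0 10 1).map (fun i => "R" ++ PySem.Int.toStr i)

def is_valid_label (msg : String) : Bool :=
  if PySem.Str.len msg = 0 then false
  -- msg[0] in string.digits: a 1-char substring test, exactly char membership in the digit chars
  else if (PySem.Str.pyGet? msg 0).any (fun c => pvDigitChars.contains c) then false
  else if pvRList.contains msg then false
  else if (["section", "data", "bss"] : List String).contains msg then false
  else PySem.Set.issubset (PySem.Set.ofList msg.toList) (PySem.Set.ofList pvCharsetA)

-- ===== PORT B =====
-- _RESERVED = ["section", "data", "bss"] + ["R" + d for d in "0123456789"]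
def pvReserved : List (List Char) :=
  ["section".toList, "data".toList, "bss".toList] ++ "0123456789".toList.map (fun d => ['R', d])

-- the body of B's for-loop: per character, class check (early return = none) and prefix filter;
-- the running index i of 'enumerate' comes with each element
def pvBLoop : List (Int × Char) → List (List Char) → Option (List (List Char))
  | [], cands => some cands
  | (i, c) :: tl, cands =>
    if !(('A' ≤ c && c ≤ 'Z') || ('a' ≤ c && c ≤ 'z') || c == '_' ||
         (decide (i > 0) && ('0' ≤ c && c ≤ '9'))) then none
    else pvBLoop tl ((cands.filter (fun w => w.take 1 == [c])).map (fun w => w.drop 1))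

def is_valid_label_alt (msg : String) : Bool :=
  match pvBLoop (PySem.List.enumerate msg.toList 0) pvReserved with
  | none => false                                         -- early 'return False' in the loop
  | some cands => !msg.toList.isEmpty && !(cands.contains ([] : List Char))

-- ===== PRECONDITION & SPEC =====
def Spec_is_valid_label (msg : String) (out : Bool) : Prop := out = is_valid_label_alt msg
instance (msg : String) (out : Bool) : Decidable (Spec_is_valid_label msg out) := by unfold Spec_is_valid_label; infer_instance

-- ===== CLAIM (what is proved, stated in full; the proofs are below) =====
def Claim_equal_is_valid_label : Prop := ∀ (msg : String), Dom_is_valid_label msg → Spec_is_valid_label msg (is_valid_label msg)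

-- ===== LEMMAS AND PROOFS =====

def pvIsStart (c : Char) : Bool := c = '_' || ('A' ≤ c && c ≤ 'Z') || ('a' ≤ c && c ≤ 'z')
def pvIsWord (c : Char) : Bool := pvIsStart c || ('0' ≤ c && c ≤ '9')

lemma pv_toNat_inj {c d : Char} : c = d ↔ c.toNat = d.toNat :=
  ⟨fun h => h ▸ rfl, fun h => Char.ext (UInt32.toNat_inj.mp h)⟩

lemma pv_le_toNat {c d : Char} : c ≤ d ↔ c.toNat ≤ d.toNat := by
  rw [Char.le_def, UInt32.le_iff_toNat_le]; rfl

lemma pv_mem_map_toNat (c : Char) (l : List Char) : c ∈ l ↔ c.toNat ∈ l.map Char.toNat := by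
  rw [List.mem_map]
  exact ⟨fun h => ⟨c, h, rfl⟩, fun ⟨d, hd, he⟩ => by rwa [pv_toNat_inj.mpr he.symm]⟩

lemma pv_charsetA_map : pvCharsetA.map Char.toNat =
    [65,66,67,68,69,70,71,72,73,74,75,76,77,78,79,80,81,82,83,84,85,86,87,88,89,90,
     97,98,99,100,101,102,103,104,105,106,107,108,109,110,111,112,113,114,115,116,117,118,119,120,121,122,
     48,49,50,51,52,53,54,55,56,57,95] := rfl

lemma pv_mem_charsetA (c : Char) : (c ∈ pvCharsetA) ↔ pvIsWord c = true := by
  rw [pv_mem_map_toNat, pv_charsetA_map]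
  simp only [pvIsWord, pvIsStart, List.mem_cons, List.not_mem_nil, or_false, Bool.or_eq_true,
    Bool.and_eq_true, decide_eq_true_eq, pv_toNat_inj, pv_le_toNat]
  have h1 : ('_' : Char).toNat = 95 := rfl
  have h2 : ('A' : Char).toNat = 65 := rfl
  have h3 : ('Z' : Char).toNat = 90 := rfl
  have h4 : ('a' : Char).toNat = 97 := rfl
  have h5 : ('z' : Char).toNat = 122 := rfl
  have h6 : ('0' : Char).toNat = 48 := rfl
  have h7 : ('9' : Char).toNat = 57 := rfl
  rw [h1, h2, h3, h4, h5, h6, h7]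
  omega

lemma pv_digitChars_map : pvDigitChars.map Char.toNat = [48,49,50,51,52,53,54,55,56,57] := rfl

lemma pv_contains_digits (c : Char) : pvDigitChars.contains c = ('0' ≤ c && c ≤ '9') := by
  rw [Bool.eq_iff_iff, List.contains_iff_mem, pv_mem_map_toNat, pv_digitChars_map]
  simp only [List.mem_cons, List.not_mem_nil, or_false, Bool.and_eq_true, decide_eq_true_eq,
    pv_le_toNat]
  have h6 : ('0' : Char).toNat = 48 := rfl
  have h7 : ('9' : Char).toNat = 57 := rfl
  rw [h6, h7]
  omega

lemma pv_rlist_val : pvRList = ["R0","R1","R2","R3","R4","R5","R6","R7","R8","R9"] := by decide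

-- canonical form used only by the proofs
def pvCanon (c : Char) (rest : List Char) : Bool :=
  if c :: rest = "section".toList ∨ c :: rest = "data".toList ∨ c :: rest = "bss".toList then false
  else if c = 'R' ∧ rest.length = 1 ∧ PySem.Chars.strIsdigit rest = true then false
  else pvIsStart c && rest.all pvIsWord

lemma pv_rmem_iff (c : Char) (rest : List Char) :
    pvRList.contains (String.ofList (c :: rest))
      = (c = 'R' && rest.length = 1 && PySem.Chars.strIsdigit rest) := by
  have h0 : ("R0" : String).toList = ['R','0'] := rfl
  have h1 : ("R1" : String).toList = ['R','1'] := rfl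
  have h2 : ("R2" : String).toList = ['R','2'] := rfl
  have h3 : ("R3" : String).toList = ['R','3'] := rfl
  have h4 : ("R4" : String).toList = ['R','4'] := rfl
  have h5 : ("R5" : String).toList = ['R','5'] := rfl
  have h6 : ("R6" : String).toList = ['R','6'] := rfl
  have h7 : ("R7" : String).toList = ['R','7'] := rfl
  have h8 : ("R8" : String).toList = ['R','8'] := rfl
  have h9 : ("R9" : String).toList = ['R','9'] := rfl
  rw [pv_rlist_val, Bool.eq_iff_iff, List.contains_iff_mem]
  match rest with
  | [] => simp [String.ext_iff, h0, h1, h2, h3, h4, h5, h6, h7, h8, h9]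
  | d :: e :: tl => simp [String.ext_iff, h0, h1, h2, h3, h4, h5, h6, h7, h8, h9,
      PySem.Chars.strIsdigit]
  | [d] =>
    simp only [List.mem_cons, List.not_mem_nil, or_false, String.ext_iff, String.toList_ofList,
      h0, h1, h2, h3, h4, h5, h6, h7, h8, h9, List.cons.injEq, and_true,
      Bool.and_eq_true, decide_eq_true_eq, List.length_cons, List.length_nil,
      PySem.Chars.strIsdigit, PySem.Chars.isdigit, List.all_cons, List.all_nil,
      List.isEmpty_cons, Bool.not_false, true_and]
    simp only [pv_toNat_inj, pv_le_toNat]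
    have e0 : ('0' : Char).toNat = 48 := rfl
    have e1 : ('1' : Char).toNat = 49 := rfl
    have e2 : ('2' : Char).toNat = 50 := rfl
    have e3 : ('3' : Char).toNat = 51 := rfl
    have e4 : ('4' : Char).toNat = 52 := rfl
    have e5 : ('5' : Char).toNat = 53 := rfl
    have e6 : ('6' : Char).toNat = 54 := rfl
    have e7 : ('7' : Char).toNat = 55 := rfl
    have e8 : ('8' : Char).toNat = 56 := rfl
    have e9 : ('9' : Char).toNat = 57 := rfl
    have eR : ('R' : Char).toNat = 82 := rfl
    rw [e0, e1, e2, e3, e4, e5, e6, e7, e8, e9, eR]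
    omega

lemma pv_word_eq (c : Char) : pvIsWord c = (pvIsStart c || ('0' ≤ c && c ≤ '9')) := rfl

lemma pv_start_of_digit (c : Char) (h : ('0' ≤ c && c ≤ '9') = true) : pvIsStart c = false := by
  simp only [Bool.and_eq_true, decide_eq_true_eq, pv_le_toNat] at h
  have e0 : ('0' : Char).toNat = 48 := rfl
  have e9 : ('9' : Char).toNat = 57 := rfl
  rw [e0, e9] at h
  rw [Bool.eq_false_iff]
  intro hs
  simp only [pvIsStart, Bool.or_eq_true, Bool.and_eq_true, decide_eq_true_eq, pv_toNat_inj,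
    pv_le_toNat] at hs
  have f1 : ('_' : Char).toNat = 95 := rfl
  have f2 : ('A' : Char).toNat = 65 := rfl
  have f3 : ('Z' : Char).toNat = 90 := rfl
  have f4 : ('a' : Char).toNat = 97 := rfl
  have f5 : ('z' : Char).toNat = 122 := rfl
  rw [f1, f2, f3, f4, f5] at hs
  omega

lemma pv_words (msg : String) : (["section", "data", "bss"] : List String).contains msg
    = (msg = "section" || msg = "data" || msg = "bss") := by
  rw [Bool.eq_iff_iff, List.contains_iff_mem]
  simp [or_assoc]

lemma pv_subset_iff (c : Char) (rest : List Char) :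
    PySem.Set.issubset (PySem.Set.ofList (c :: rest)) (PySem.Set.ofList pvCharsetA)
      = (pvIsWord c && rest.all pvIsWord) := by
  rw [Bool.eq_iff_iff, PySem.Set.issubset_iff]
  simp only [PySem.Set.mem_ofList, Bool.and_eq_true, List.all_eq_true, List.mem_cons,
    pv_mem_charsetA]
  constructor
  · intro h
    exact ⟨h c (Or.inl rfl), fun x hx => h x (Or.inr hx)⟩
  · rintro ⟨h1, h2⟩ x (rfl | hx)
    · exact h1
    · exact h2 x hx

lemma pv_A_canon (c : Char) (rest : List Char) :
    is_valid_label (String.ofList (c :: rest)) = pvCanon c rest := by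
  rw [is_valid_label, pvCanon]
  by_cases hW : c :: rest = "section".toList ∨ c :: rest = "data".toList ∨ c :: rest = "bss".toList
  · rcases hW with h | h | h
    · rw [show "section".toList = ['s','e','c','t','i','o','n'] from rfl] at h
      injection h with h1 h2; subst h1; subst h2; decide
    · rw [show "data".toList = ['d','a','t','a'] from rfl] at h
      injection h with h1 h2; subst h1; subst h2; decide
    · rw [show "bss".toList = ['b','s','s'] from rfl] at h
      injection h with h1 h2; subst h1; subst h2; decide
  · rw [if_neg hW]
    have hW' : (["section", "data", "bss"] : List String).contains (String.ofList (c :: rest)) = false := by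
      rw [pv_words]
      simp only [Bool.or_eq_false_iff, decide_eq_false_iff_not, String.ext_iff,
        String.toList_ofList]
      push Not at hW
      exact ⟨⟨hW.1, hW.2.1⟩, hW.2.2⟩
    rw [pv_rmem_iff, hW']
    have hlen : ¬ (PySem.Str.len (String.ofList (c :: rest)) = 0) := by
      simp only [PySem.Str.len, String.toList_ofList, List.length_cons]
      omega
    rw [if_neg hlen]
    have hget : PySem.Str.pyGet? (String.ofList (c :: rest)) 0 = some c := by
      simp
    rw [hget]
    simp only [Option.any_some, pv_contains_digits, String.toList_ofList, pv_subset_iff,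
      Bool.false_eq_true, if_false]
    by_cases hR : c = 'R' ∧ rest.length = 1 ∧ PySem.Chars.strIsdigit rest = true
    · rw [if_pos hR]
      obtain ⟨rfl, h1, h2⟩ := hR
      rw [show (('0' ≤ 'R' && 'R' ≤ '9') : Bool) = false from rfl]
      simp [h1, h2]
    · rw [if_neg hR]
      have hRb : (decide (c = 'R') && decide (rest.length = 1) && PySem.Chars.strIsdigit rest) = false := by
        rw [Bool.eq_false_iff]
        intro hb
        apply hR
        simpa [Bool.and_eq_true, decide_eq_true_eq, and_assoc] using hb
      rw [hRb]
      simp only [Bool.false_eq_true, if_false]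
      by_cases hd : ('0' ≤ c && c ≤ '9') = true
      · rw [if_pos hd, pv_start_of_digit c hd]
        simp
      · rw [if_neg hd]
        rw [Bool.not_eq_true] at hd
        rw [pv_word_eq, hd, Bool.or_false]

-- ===== B-side lemmas =====

-- the per-character class test of B's loop
def pvClassOk (i : Int) (c : Char) : Bool :=
  ('A' ≤ c && c ≤ 'Z') || ('a' ≤ c && c ≤ 'z') || c == '_' ||
    (decide (i > 0) && ('0' ≤ c && c ≤ '9'))

-- the candidate-narrowing part of the loop, indices forgotten
def pvStep : List Char → List (List Char) → List (List Char)
  | [], cands => cands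
  | c :: cs, cands => pvStep cs ((cands.filter (fun w => w.take 1 == [c])).map (fun w => w.drop 1))

lemma pvBLoop_cons (i : Int) (c : Char) (tl : List (Int × Char)) (cands : List (List Char)) :
    pvBLoop ((i, c) :: tl) cands =
      if !(pvClassOk i c) then none
      else pvBLoop tl ((cands.filter (fun w => w.take 1 == [c])).map (fun w => w.drop 1)) := rfl

lemma pv_loop_eq (l : List (Int × Char)) (cands : List (List Char)) :
    pvBLoop l cands =
      if l.all (fun p => pvClassOk p.1 p.2) then some (pvStep (l.map Prod.snd) cands)
      else none := by
  induction l generalizing cands with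
  | nil => rfl
  | cons p tl ih =>
    obtain ⟨i, c⟩ := p
    rw [pvBLoop_cons]
    cases h : pvClassOk i c with
    | false => simp [h, List.all_cons]
    | true =>
      simp only [Bool.not_true, Bool.false_eq_true, if_false, ih, List.all_cons, h,
        Bool.true_and, List.map_cons, pvStep]

lemma pv_step_mem (cs : List Char) (cands : List (List Char)) :
    (([] : List Char) ∈ pvStep cs cands) ↔ cs ∈ cands := by
  induction cs generalizing cands with
  | nil => rfl
  | cons c cs ih =>
    rw [pvStep, ih]
    constructor
    · intro h
      rw [List.mem_map] at h
      obtain ⟨w, hw, hd⟩ := h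
      rw [List.mem_filter] at hw
      obtain ⟨hwm, hwt⟩ := hw
      match w, hwm with
      | a :: w', hwm =>
        have : a = c := by
          simp only [List.take, beq_iff_eq, List.cons.injEq, and_true] at hwt
          exact hwt
        subst this
        simp only [List.drop_one, List.tail_cons] at hd
        subst hd
        exact hwm
      | [], hwm => simp at hwt
    · intro h
      rw [List.mem_map]
      exact ⟨c :: cs, List.mem_filter.mpr ⟨h, by simp⟩, rfl⟩

lemma pv_classOk_zero (c : Char) : pvClassOk 0 c = pvIsStart c := by
  have h0 : decide ((0 : Int) > 0) = false := by decide
  rw [Bool.eq_iff_iff]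
  simp only [pvClassOk, pvIsStart, h0, Bool.false_and, Bool.or_false, Bool.or_eq_true,
    Bool.and_eq_true, decide_eq_true_eq, beq_iff_eq]
  tauto

lemma pv_classOk_pos (i : Int) (hi : 0 < i) (c : Char) : pvClassOk i c = pvIsWord c := by
  have h0 : decide (i > 0) = true := decide_eq_true hi
  rw [Bool.eq_iff_iff]
  simp only [pvClassOk, pvIsWord, pvIsStart, h0, Bool.true_and, Bool.or_eq_true,
    Bool.and_eq_true, decide_eq_true_eq, beq_iff_eq]
  tauto

lemma pv_all_enum (rest : List Char) (s : Int) (hs : 0 < s) :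
    (PySem.List.enumerate rest s).all (fun p => pvClassOk p.1 p.2) = rest.all pvIsWord := by
  induction rest generalizing s with
  | nil => rfl
  | cons c cs ih =>
    rw [PySem.List.enumerate_cons, List.all_cons, List.all_cons, pv_classOk_pos s hs c,
      ih (s + 1) (by omega)]

lemma pv_digit_single (d : Char) :
    (['R', d] ∈ "0123456789".toList.map (fun x => (['R', x] : List Char)))
      ↔ PySem.Chars.strIsdigit [d] = true := by
  rw [List.mem_map]
  simp only [List.cons.injEq, true_and, and_true,
    PySem.Chars.strIsdigit, PySem.Chars.isdigit, List.all_cons, List.all_nil,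
    List.isEmpty_cons, Bool.not_false, Bool.true_and, Bool.and_true]
  rw [show ("0123456789" : String).toList = ['0','1','2','3','4','5','6','7','8','9'] from rfl]
  simp only [List.mem_cons, List.not_mem_nil, or_false, Bool.and_eq_true, decide_eq_true_eq]
  constructor
  · rintro ⟨x, hx, rfl⟩
    rcases hx with rfl|rfl|rfl|rfl|rfl|rfl|rfl|rfl|rfl|rfl <;> decide
  · intro h
    simp only [pv_le_toNat] at h
    have e0 : ('0' : Char).toNat = 48 := rfl
    have e9 : ('9' : Char).toNat = 57 := rfl
    rw [e0, e9] at h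
    refine ⟨d, ?_, rfl⟩
    simp only [pv_toNat_inj]
    have : d.toNat = 48 ∨ d.toNat = 49 ∨ d.toNat = 50 ∨ d.toNat = 51 ∨ d.toNat = 52 ∨
        d.toNat = 53 ∨ d.toNat = 54 ∨ d.toNat = 55 ∨ d.toNat = 56 ∨ d.toNat = 57 := by omega
    simpa using this

lemma pv_reserved_mem (c : Char) (rest : List Char) :
    (c :: rest ∈ pvReserved) ↔
      ((c :: rest = "section".toList ∨ c :: rest = "data".toList ∨ c :: rest = "bss".toList) ∨
        (c = 'R' ∧ rest.length = 1 ∧ PySem.Chars.strIsdigit rest = true)) := by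
  rw [pvReserved, List.mem_append]
  constructor
  · rintro (h | h)
    · left; simpa [or_assoc] using h
    · right
      rw [List.mem_map] at h
      obtain ⟨d, hd, he⟩ := h
      have hc : c = 'R' := by
        have := congrArg (fun l => l.headI) he
        simpa using this.symm
      have hr : rest = [d] := by
        have := congrArg List.tail he
        simpa using this.symm
      subst hc; subst hr
      exact ⟨rfl, rfl, (pv_digit_single d).mp (List.mem_map.mpr ⟨d, hd, rfl⟩)⟩
  · rintro (h | ⟨rfl, hl, hd⟩)
    · left; simpa [or_assoc] using h
    · right
      match rest, hl with
      | [d], _ => exact (pv_digit_single d).mpr hd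
  
lemma pv_B_canon (c : Char) (rest : List Char) :
    is_valid_label_alt (String.ofList (c :: rest)) = pvCanon c rest := by
  rw [is_valid_label_alt]
  simp only [String.toList_ofList]
  rw [PySem.List.enumerate_cons, pv_loop_eq]
  have hall : ((((0 : Int), c) :: PySem.List.enumerate rest (0 + 1)).all
      (fun p => pvClassOk p.1 p.2)) = (pvIsStart c && rest.all pvIsWord) := by
    rw [List.all_cons]
    show (pvClassOk 0 c && _) = _
    rw [pv_classOk_zero, zero_add, pv_all_enum rest 1 (by omega)]
  have hmap : ((((0 : Int), c) :: PySem.List.enumerate rest (0 + 1)).map Prod.snd) = c :: rest := by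
    simp [PySem.List.map_snd_enumerate]
  rw [hall, hmap]
  by_cases hsh : (pvIsStart c && rest.all pvIsWord) = true
  · rw [if_pos hsh]
    show (!(c :: rest).isEmpty && !((pvStep (c :: rest) pvReserved).contains [])) = pvCanon c rest
    have hcontains : (pvStep (c :: rest) pvReserved).contains ([] : List Char)
        = decide ((c :: rest = "section".toList ∨ c :: rest = "data".toList ∨ c :: rest = "bss".toList) ∨
            (c = 'R' ∧ rest.length = 1 ∧ PySem.Chars.strIsdigit rest = true)) := by
      rw [Bool.eq_iff_iff, List.contains_iff_mem, pv_step_mem, pv_reserved_mem]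
      simp
    rw [hcontains, pvCanon]
    by_cases hres : (c :: rest = "section".toList ∨ c :: rest = "data".toList ∨ c :: rest = "bss".toList) ∨
        (c = 'R' ∧ rest.length = 1 ∧ PySem.Chars.strIsdigit rest = true)
    · rw [decide_eq_true hres]
      rcases hres with h | h
      · rw [if_pos h]; simp
      · have : ¬ (c :: rest = "section".toList ∨ c :: rest = "data".toList ∨ c :: rest = "bss".toList) := by
          obtain ⟨rfl, hl, _⟩ := h
          rintro (he | he | he) <;>
            (first
              | (rw [show "section".toList = ['s','e','c','t','i','o','n'] from rfl] at he;
                 injection he with h1 h2; subst h2; simp at hl)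
              | (rw [show "data".toList = ['d','a','t','a'] from rfl] at he;
                 injection he with h1 h2; subst h2; simp at hl)
              | (rw [show "bss".toList = ['b','s','s'] from rfl] at he;
                 injection he with h1 h2; subst h2; simp at hl))
        rw [if_neg this, if_pos h]
        simp
    · rw [decide_eq_false hres]
      push Not at hres
      rw [if_neg (by tauto), if_neg (by tauto)]
      rw [hsh]
      simp
  · rw [if_neg hsh, pvCanon]
    rw [Bool.not_eq_true] at hsh
    split_ifs with h1 h2
    · rfl
    · rfl
    · exact hsh.symm ▸ rfl

-- ===== VERDICT (by name: the statement is the Claim_ definition above) =====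
theorem is_valid_label_spec : Claim_equal_is_valid_label := by
  unfold Claim_equal_is_valid_label
  intro msg _
  unfold Spec_is_valid_label
  have hmsg : msg = String.ofList msg.toList := String.ofList_toList.symm
  rw [hmsg]
  generalize msg.toList = l
  cases l with
  | nil => decide
  | cons c rest => rw [pv_A_canon, pv_B_canon]
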